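-- pv_equiv track=rewrite | github.com/netpipe/libntru-qt | testing/ntru.py | convol
-- ===== SOURCE A (Python) =====
-- def convol(f, g, n, p):
--     f = f + (n - len(f)) * [0]
--     g = g + (n - len(g)) * [0]
--     result = [0] * (n)
--     # Computing circular convolution
--     for k in range(n):
--         for i in range(k + 1):
--             result[k] += f[i] * g[k - i]
--         for i in range(k + 1, n):
--             result[k] += f[i] * g[n + k - i]
--
--     for i in range (len(result)):
--
--         if p != 0:
--             result[i] = result[i] % p  #reducing modulo
--
--
--     return result
-- ===== SOURCE B (Python) =====
-- def convol(f, g, n, p):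
--     # Linear convolution into a scatter buffer of length 2n-1, then wrap it
--     # around (result[k] = lin[k] + lin[k+n]) and reduce mod p.
--     if n <= 0:
--         return []
--     F = (f + [0] * n)[:n]
--     G = (g + [0] * n)[:n]
--     lin = [0] * (2 * n - 1)
--     for i in range(n):
--         fi = F[i]
--         for j in range(n):
--             lin[i + j] += fi * G[j]
--     res = [lin[k] + (lin[k + n] if k + n < 2 * n - 1 else 0) for k in range(n)]
--     if p != 0:
--         res = [x % p for x in res]
--     return res
-- ===== Notes on version B (the rewrite author's own statement) =====
-- stated objective: alternative
-- what changed: A gathers each circular output coefficient with two per-k inner scans using wrapped indices; B computes the plain linear convolution once by scattering f[i]*g[j] into a 2n-1 buffer and then folds the tail back (res[k] = lin[k] + lin[k+n]) before the mod-p reduction.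
import Mathlib
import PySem

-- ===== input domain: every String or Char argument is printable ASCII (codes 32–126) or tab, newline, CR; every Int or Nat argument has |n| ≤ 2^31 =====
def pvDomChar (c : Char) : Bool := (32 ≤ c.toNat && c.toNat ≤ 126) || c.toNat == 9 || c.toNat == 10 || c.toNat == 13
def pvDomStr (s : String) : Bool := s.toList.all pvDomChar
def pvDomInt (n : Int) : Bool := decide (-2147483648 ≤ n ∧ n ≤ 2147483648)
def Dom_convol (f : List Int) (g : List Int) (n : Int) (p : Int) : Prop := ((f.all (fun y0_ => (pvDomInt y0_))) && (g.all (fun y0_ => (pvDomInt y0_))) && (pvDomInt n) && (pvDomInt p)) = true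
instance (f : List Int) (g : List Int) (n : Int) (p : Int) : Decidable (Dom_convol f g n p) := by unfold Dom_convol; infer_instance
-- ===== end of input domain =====

-- B replaces A's per-output gather (two wrapped-index inner scans per k) with one
-- linear-convolution scatter pass into a 2n-1 buffer that is then wrapped; same cost class.

-- ===== PORT A =====
-- Literal port of A. Every index A uses (k, i, k-i, n+k-i on the padded lists) is in
-- range on every input (so A never raises), hence the total pyGetD/pySetD forms are exact.

-- 'f + (n - len(f)) * [0]'   (Python list repetition: non-positive count gives [])
def convolPad (l : List Int) (n : Int) : List Int :=
  l ++ List.replicate (n - PySem.List.len l).toNat 0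

-- the body of 'for k in range(n)': two inner accumulation loops 'result[k] += …'
def convolK (f1 g1 : List Int) (n : Int) (res : List Int) (k : Int) : List Int :=
  (PySem.List.pyRange (k + 1) n 1).foldl (fun res i =>
      PySem.List.pySetD res k (PySem.List.pyGetD res k 0 +
        PySem.List.pyGetD f1 i 0 * PySem.List.pyGetD g1 (n + k - i) 0))
    ((PySem.List.pyRange 0 (k + 1) 1).foldl (fun res i =>
      PySem.List.pySetD res k (PySem.List.pyGetD res k 0 +
        PySem.List.pyGetD f1 i 0 * PySem.List.pyGetD g1 (k - i) 0)) res)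

-- 'for i in range(len(result)): if p != 0: result[i] = result[i] % p'
def convolModPass (p : Int) (res : List Int) : List Int :=
  (PySem.List.pyRange 0 (PySem.List.len res) 1).foldl (fun r i =>
    if p ≠ 0 then PySem.List.pySetD r i (PySem.Int.mod (PySem.List.pyGetD r i 0) p) else r) res

def convol (f : List Int) (g : List Int) (n : Int) (p : Int) : List Int :=
  convolModPass p
    ((PySem.List.pyRange 0 n 1).foldl (convolK (convolPad f n) (convolPad g n) n)
      (List.replicate n.toNat 0))

-- ===== PORT B =====
-- Literal port of B (Source B): scatter f[i]*g[j] into a linear buffer of length 2n-1, wrap, reduce.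

-- the body of 'for i in range(n)': 'fi = F[i]; for j in range(n): lin[i+j] += fi * G[j]'
def convolAltRow (F G : List Int) (n : Int) (lin : List Int) (i : Int) : List Int :=
  (PySem.List.pyRange 0 n 1).foldl (fun lin2 j =>
    PySem.List.pySetD lin2 (i + j)
      (PySem.List.pyGetD lin2 (i + j) 0 + PySem.List.pyGetD F i 0 * PySem.List.pyGetD G j 0)) lin

-- 'res = [lin[k] + (lin[k + n] if k + n < 2*n - 1 else 0) for k in range(n)]'
def convolAltRes (n : Int) (lin : List Int) : List Int :=
  (PySem.List.pyRange 0 n 1).map (fun k =>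
    PySem.List.pyGetD lin k 0 +
      (if k + n < 2 * n - 1 then PySem.List.pyGetD lin (k + n) 0 else 0))

-- 'if p != 0: res = [x % p for x in res]'
def convolAltMod (p : Int) (res : List Int) : List Int :=
  if p ≠ 0 then res.map (fun x => PySem.Int.mod x p) else res

def convol_alt (f : List Int) (g : List Int) (n : Int) (p : Int) : List Int :=
  if n ≤ 0 then []
  else
    convolAltMod p (convolAltRes n
      ((PySem.List.pyRange 0 n 1).foldl
        (convolAltRow (PySem.List.slice (f ++ List.replicate n.toNat 0) none (some n))
                      (PySem.List.slice (g ++ List.replicate n.toNat 0) none (some n)) n)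
        (List.replicate (2 * n - 1).toNat 0)))

-- ===== PRECONDITION & SPEC =====
def Spec_convol (f : List Int) (g : List Int) (n : Int) (p : Int) (out : List Int) : Prop := out = convol_alt f g n p
instance (f : List Int) (g : List Int) (n : Int) (p : Int) (out : List Int) : Decidable (Spec_convol f g n p out) := by unfold Spec_convol; infer_instance

-- ===== CLAIM (what is proved, stated in full; the proofs are below) =====
def Claim_equal_convol : Prop := ∀ (f : List Int) (g : List Int) (n : Int) (p : Int), Dom_convol f g n p → Spec_convol f g n p (convol f g n p)

-- ===== LEMMAS AND PROOFS =====

-- value of coefficient i (0 beyond the end — zero padding does not change it)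
def pvCoef (f : List Int) (i : Nat) : Int := f.getD i 0

-- the two sums A accumulates into result[k]
def pvS1 (f g : List Int) (k : Nat) : Int :=
  ∑ i ∈ Finset.range (k + 1), pvCoef f i * pvCoef g (k - i)
def pvS2 (f g : List Int) (m k : Nat) : Int :=
  ∑ j ∈ Finset.range (m - (k + 1)), pvCoef f (k + 1 + j) * pvCoef g (m - 1 - j)

-- what B's linear buffer holds at position t
def pvLin (f g : List Int) (m t : Nat) : Int :=
  ∑ i ∈ Finset.range m, ∑ j ∈ Finset.range m, (if i + j = t then pvCoef f i * pvCoef g j else 0)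

-- the shared mod-p postprocessing
def pvPost (p : Int) (l : List Int) : List Int :=
  if p = 0 then l else l.map (fun x => PySem.Int.mod x p)

lemma pv_getD_set (l : List Int) (i j : Nat) (v : Int) :
    (l.set i v).getD j 0 = if i = j ∧ i < l.length then v else l.getD j 0 := by
  simp only [List.getD_eq_getElem?_getD, List.getElem?_set]
  split_ifs with h1 h2 h3 <;> simp_all
  omega

lemma pv_set_add_step (ys : List Int) (k : Nat) (w : Int) (hk : k < ys.length) (t : Nat) :
    (ys.set k (ys.getD k 0 + w)).getD t 0 = ys.getD t 0 + if k = t then w else 0 := by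
  rw [pv_getD_set]
  by_cases h : k = t
  · subst h; rw [if_pos ⟨rfl, hk⟩, if_pos rfl]
  · rw [if_neg (by tauto), if_neg h, add_zero]

lemma pv_getD_pad (f : List Int) (r i : Nat) :
    (f ++ List.replicate r (0 : Int)).getD i 0 = f.getD i 0 := by
  rcases lt_or_ge i f.length with h | h
  · simp [List.getD_eq_getElem?_getD, List.getElem?_append_left h]
  · simp only [List.getD_eq_getElem?_getD, List.getElem?_append_right h, List.getElem?_replicate]
    split <;> simp [List.getElem?_eq_none_iff.mpr h]

lemma pv_getD_take (l : List Int) (m i : Nat) (h : i < m) :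
    (l.take m).getD i 0 = l.getD i 0 := by
  simp [List.getD_eq_getElem?_getD, h]

lemma pv_sum_range_eq (n : Nat) (h : Nat → Int) :
    ((List.range n).map h).sum = ∑ i ∈ Finset.range n, h i := rfl

lemma pv_sum_ite_const (c : Prop) [Decidable c] (L : List Nat) (w : Nat → Int) :
    (L.map (fun i => if c then w i else 0)).sum = if c then (L.map w).sum else 0 := by
  split <;> simp

-- read-modify-write folds, pointwise: every step changes position-wise values additively
lemma pv_foldl_pointwise_add {ι : Type} (N : Nat) (step : List Int → ι → List Int)
    (c : ι → Nat → Int) :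
    ∀ (L : List ι) (xs : List Int),
      (∀ i ∈ L, ∀ ys : List Int, ys.length = N →
        (step ys i).length = N ∧ ∀ t, (step ys i).getD t 0 = ys.getD t 0 + c i t) →
      xs.length = N →
      (L.foldl step xs).length = N ∧
        ∀ t, (L.foldl step xs).getD t 0 = xs.getD t 0 + (L.map (fun i => c i t)).sum := by
  intro L
  induction L with
  | nil => intro xs _ hxs; simpa using hxs
  | cons a L ih =>
    intro xs h hxs
    have ha := h a (by simp) xs hxs
    have ih' := ih (step xs a) (fun i hi => h i (by simp [hi])) ha.1
    refine ⟨ih'.1, fun t => ?_⟩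
    rw [List.foldl_cons] at *
    rw [ih'.2 t, ha.2 t]
    simp [add_assoc]

-- in-place map over all indices in increasing order
lemma pv_inplace_map (h : Int → Int) :
    ∀ (zs ys : List Int),
      (List.range' ys.length zs.length).foldl (fun r i => r.set i (h (r.getD i 0))) (ys ++ zs)
        = ys ++ zs.map h := by
  intro zs
  induction zs with
  | nil => intro ys; simp
  | cons z zs ih =>
    intro ys
    have hset : (ys ++ z :: zs).set ys.length (h z) = ys ++ h z :: zs := by
      induction ys with
      | nil => rfl
      | cons y ys ihy => simp [ihy]
    have hget : (ys ++ z :: zs).getD ys.length 0 = z := by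
      simp [List.getD_eq_getElem?_getD]
    rw [List.length_cons, List.range'_succ, List.foldl_cons, hget, hset]
    have := ih (ys ++ [h z])
    simp only [List.length_append, List.length_cons, List.length_nil] at this ⊢
    simpa [List.append_assoc] using this

-- pyRange folds/maps as Nat-range folds/maps
lemma pv_foldl_pyRange_zero {α : Type} (m : Nat) (F : α → Int → α) (init : α) :
    (PySem.List.pyRange 0 (m:Int) 1).foldl F init
      = (List.range m).foldl (fun acc (k : Nat) => F acc (k : Int)) init := by
  rw [PySem.List.pyRange_one]
  have h : ((m:Int) - 0).toNat = m := by omega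
  rw [h, List.foldl_map]
  simp only [zero_add]

lemma pv_foldl_pyRange_off {α : Type} (a b : Nat) (F : α → Int → α) (init : α) :
    (PySem.List.pyRange (a:Int) (b:Int) 1).foldl F init
      = (List.range (b - a)).foldl (fun acc (j : Nat) => F acc ((a + j : Nat) : Int)) init := by
  rw [PySem.List.pyRange_one]
  have h : ((b:Int) - a).toNat = b - a := by omega
  rw [h, List.foldl_map]
  simp only [Nat.cast_add]

lemma pv_map_pyRange_zero {α : Type} (m : Nat) (F : Int → α) :
    (PySem.List.pyRange 0 (m:Int) 1).map F = (List.range m).map (fun (k : Nat) => F (k : Int)) := by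
  rw [PySem.List.pyRange_one]
  have h : ((m:Int) - 0).toNat = m := by omega
  rw [h, List.map_map]
  simp only [Function.comp_def, zero_add]

-- picking the single hit out of a scatter row
lemma pv_inner_pick (m i t : Nat) (h : Nat → Int) :
    (∑ j ∈ Finset.range m, if i + j = t then h j else 0)
      = if i ≤ t ∧ t < i + m then h (t - i) else 0 := by
  by_cases hit : i ≤ t
  · have : ∀ j ∈ Finset.range m, (if i + j = t then h j else 0) = (if j = t - i then h j else 0) := by
      intro j _; congr 1; simp; omega
    rw [Finset.sum_congr rfl this, Finset.sum_ite_eq' (Finset.range m) (t - i) h]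
    simp only [Finset.mem_range]
    split_ifs <;> first | rfl | omega
  · have : ∀ j ∈ Finset.range m, (if i + j = t then h j else 0) = 0 := by
      intro j _; rw [if_neg]; omega
    rw [Finset.sum_congr rfl this]
    simp [hit]

-- A's k-loop body, pointwise
lemma pv_convolK_step (f g : List Int) (m k : Nat) (hk : k < m) (ys : List Int)
    (hys : ys.length = m) :
    (convolK (convolPad f m) (convolPad g m) (m:Int) ys (k:Int)).length = m ∧
      ∀ t, (convolK (convolPad f m) (convolPad g m) (m:Int) ys (k:Int)).getD t 0
        = ys.getD t 0 + if k = t then pvS1 f g k + pvS2 f g m k else 0 := by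
  have hpadf : ∀ i : Nat, (convolPad f (m:Int)).getD i 0 = pvCoef f i := by
    intro i; unfold convolPad pvCoef; exact pv_getD_pad f _ i
  have hpadg : ∀ i : Nat, (convolPad g (m:Int)).getD i 0 = pvCoef g i := by
    intro i; unfold convolPad pvCoef; exact pv_getD_pad g _ i
  have e1 : (k:Int) + 1 = ((k + 1 : Nat) : Int) := by push_cast; ring
  unfold convolK
  rw [e1, pv_foldl_pyRange_off (k+1) m, pv_foldl_pyRange_zero (k+1)]
  obtain ⟨hl1, hv1⟩ := pv_foldl_pointwise_add m
    (fun res (i : Nat) => PySem.List.pySetD res (k:Int) (PySem.List.pyGetD res (k:Int) 0 +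
      PySem.List.pyGetD (convolPad f (m:Int)) ((i : Nat) : Int) 0 *
      PySem.List.pyGetD (convolPad g (m:Int)) ((k:Int) - ((i : Nat) : Int)) 0))
    (fun i t => if k = t then pvCoef f i * pvCoef g (k - i) else 0)
    (List.range (k+1)) ys
    (by
      intro i hi ys' hys'
      rw [List.mem_range] at hi
      have e2 : (k:Int) - (i:Int) = ((k - i : Nat) : Int) := by omega
      beta_reduce
      rw [e2]
      simp only [PySem.List.pySetD_natCast, PySem.List.pyGetD_natCast, hpadf, hpadg]
      refine ⟨by simpa using hys', fun t => ?_⟩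
      exact pv_set_add_step ys' k _ (by omega) t)
    hys
  obtain ⟨hl2, hv2⟩ := pv_foldl_pointwise_add m
    (fun res (j : Nat) => PySem.List.pySetD res (k:Int) (PySem.List.pyGetD res (k:Int) 0 +
      PySem.List.pyGetD (convolPad f (m:Int)) ((k + 1 + j : Nat) : Int) 0 *
      PySem.List.pyGetD (convolPad g (m:Int)) ((m:Int) + (k:Int) - ((k + 1 + j : Nat) : Int)) 0))
    (fun j t => if k = t then pvCoef f (k + 1 + j) * pvCoef g (m - 1 - j) else 0)
    (List.range (m - (k+1))) _
    (by
      intro j hj ys' hys'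
      rw [List.mem_range] at hj
      have e3 : (m:Int) + (k:Int) - ((k + 1 + j : Nat) : Int) = ((m - 1 - j : Nat) : Int) := by
        push_cast; omega
      beta_reduce
      rw [e3]
      simp only [PySem.List.pySetD_natCast, PySem.List.pyGetD_natCast, hpadf, hpadg]
      refine ⟨by simpa using hys', fun t => ?_⟩
      exact pv_set_add_step ys' k _ (by omega) t)
    hl1
  refine ⟨hl2, fun t => ?_⟩
  rw [hv2 t, hv1 t, pv_sum_ite_const, pv_sum_ite_const, pv_sum_range_eq, pv_sum_range_eq]
  by_cases h : k = t <;> simp [h, pvS1, pvS2, add_assoc]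

-- A's result before the mod pass
lemma pv_A_pre (f g : List Int) (m : Nat) :
    (PySem.List.pyRange 0 (m:Int) 1).foldl (convolK (convolPad f m) (convolPad g m) m)
        (List.replicate m 0)
      = (List.range m).map (fun k => pvS1 f g k + pvS2 f g m k) := by
  rw [pv_foldl_pyRange_zero m]
  obtain ⟨hl, hv⟩ := pv_foldl_pointwise_add m
    (fun res (k : Nat) => convolK (convolPad f (m:Int)) (convolPad g (m:Int)) (m:Int) res ((k:Nat) : Int))
    (fun k t => if k = t then pvS1 f g k + pvS2 f g m k else 0)
    (List.range m) (List.replicate m 0)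
    (fun k hk ys hys => pv_convolK_step f g m k (List.mem_range.mp hk) ys hys)
    (by simp)
  apply List.ext_getElem (by simp [hl])
  intro t h1 h2
  rw [← List.getD_eq_getElem _ 0 h1, ← List.getD_eq_getElem _ 0 h2, hv t, pv_sum_range_eq,
      Finset.sum_ite_eq' (Finset.range m) t (fun k => pvS1 f g k + pvS2 f g m k)]
  have ht : t < m := by simpa [hl] using h1
  simp [List.getD_eq_getElem?_getD, ht]

-- the mod pass is pvPost
lemma pv_modPass (p : Int) (l : List Int) : convolModPass p l = pvPost p l := by
  unfold convolModPass pvPost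
  by_cases hp : p = 0
  · simp [hp]
  · rw [if_neg hp]
    have hlen : PySem.List.len l = ((l.length : Nat) : Int) := by simp
    rw [hlen, pv_foldl_pyRange_zero l.length]
    simp only [ne_eq, hp, not_false_iff, if_true,
      PySem.List.pySetD_natCast, PySem.List.pyGetD_natCast]
    rw [List.range_eq_range']
    have := pv_inplace_map (fun x => PySem.Int.mod x p) l []
    simpa using this

-- characterization of A
lemma pv_A_char (f g : List Int) (n p : Int) (hn : 0 < n) :
    convol f g n p
      = pvPost p ((List.range n.toNat).map (fun k => pvS1 f g k + pvS2 f g n.toNat k)) := by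
  obtain ⟨m, rfl⟩ : ∃ m : Nat, n = (m:Int) := ⟨n.toNat, by omega⟩
  unfold convol
  rw [show ((m:Int)).toNat = m from by omega, pv_A_pre f g m, pv_modPass]

-- B's row body, pointwise
lemma pv_row_step (f g : List Int) (m i : Nat) (hm : 0 < m) (hi : i < m) (ys : List Int)
    (hys : ys.length = 2 * m - 1) :
    (convolAltRow (PySem.List.slice (f ++ List.replicate m 0) none (some (m:Int)))
        (PySem.List.slice (g ++ List.replicate m 0) none (some (m:Int))) (m:Int) ys (i:Int)).length
        = 2 * m - 1 ∧
      ∀ t, (convolAltRow (PySem.List.slice (f ++ List.replicate m 0) none (some (m:Int)))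
        (PySem.List.slice (g ++ List.replicate m 0) none (some (m:Int))) (m:Int) ys (i:Int)).getD t 0
        = ys.getD t 0 + ∑ j ∈ Finset.range m, (if i + j = t then pvCoef f i * pvCoef g j else 0) := by
  have hF : ∀ i : Nat, i < m →
      (PySem.List.slice (f ++ List.replicate m 0) none (some (m:Int))).getD i 0 = pvCoef f i := by
    intro i him
    rw [PySem.List.slice_to_natCast, pv_getD_take _ _ _ him]
    exact pv_getD_pad f m i
  have hG : ∀ i : Nat, i < m →
      (PySem.List.slice (g ++ List.replicate m 0) none (some (m:Int))).getD i 0 = pvCoef g i := by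
    intro i him
    rw [PySem.List.slice_to_natCast, pv_getD_take _ _ _ him]
    exact pv_getD_pad g m i
  unfold convolAltRow
  rw [pv_foldl_pyRange_zero m]
  obtain ⟨hl, hv⟩ := pv_foldl_pointwise_add (2 * m - 1)
    (fun lin2 (j : Nat) => PySem.List.pySetD lin2 ((i:Int) + ((j:Nat) : Int))
      (PySem.List.pyGetD lin2 ((i:Int) + ((j:Nat) : Int)) 0 +
        PySem.List.pyGetD (PySem.List.slice (f ++ List.replicate m 0) none (some (m:Int))) (i:Int) 0 *
        PySem.List.pyGetD (PySem.List.slice (g ++ List.replicate m 0) none (some (m:Int))) ((j:Nat) : Int) 0))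
    (fun j t => if i + j = t then pvCoef f i * pvCoef g j else 0)
    (List.range m) ys
    (by
      intro j hj ys' hys'
      rw [List.mem_range] at hj
      have e : (i:Int) + (j:Int) = ((i + j : Nat) : Int) := by push_cast; ring
      beta_reduce
      rw [e]
      simp only [PySem.List.pySetD_natCast, PySem.List.pyGetD_natCast, hF i hi, hG j hj]
      refine ⟨by simpa using hys', fun t => ?_⟩
      exact pv_set_add_step ys' (i + j) _ (by omega) t)
    hys
  exact ⟨hl, fun t => by rw [hv t, pv_sum_range_eq]⟩

-- B's linear buffer
lemma pv_B_lin (f g : List Int) (m : Nat) (hm : 0 < m) :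
    ∀ t, ((PySem.List.pyRange 0 (m:Int) 1).foldl
        (convolAltRow (PySem.List.slice (f ++ List.replicate m 0) none (some (m:Int)))
          (PySem.List.slice (g ++ List.replicate m 0) none (some (m:Int))) m)
        (List.replicate (2 * m - 1) 0)).getD t 0 = pvLin f g m t := by
  intro t
  rw [pv_foldl_pyRange_zero m]
  obtain ⟨hl, hv⟩ := pv_foldl_pointwise_add (2 * m - 1)
    (fun lin (i : Nat) => convolAltRow
      (PySem.List.slice (f ++ List.replicate m 0) none (some (m:Int)))
      (PySem.List.slice (g ++ List.replicate m 0) none (some (m:Int))) (m:Int) lin ((i:Nat) : Int))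
    (fun i t => ∑ j ∈ Finset.range m, (if i + j = t then pvCoef f i * pvCoef g j else 0))
    (List.range m) (List.replicate (2 * m - 1) 0)
    (fun i hi ys hys => pv_row_step f g m i hm (List.mem_range.mp hi) ys hys)
    (by simp)
  rw [hv t, pv_sum_range_eq]
  simp [pvLin, List.getD_eq_getElem?_getD, List.getElem?_replicate]
  split <;> simp

-- characterization of B
lemma pv_B_char (f g : List Int) (n p : Int) (hn : 0 < n) :
    convol_alt f g n p
      = pvPost p ((List.range n.toNat).map (fun k =>
          pvLin f g n.toNat k + if k < n.toNat - 1 then pvLin f g n.toNat (k + n.toNat) else 0)) := by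
  obtain ⟨m, rfl⟩ : ∃ m : Nat, n = (m:Int) := ⟨n.toNat, by omega⟩
  have hm : 0 < m := by exact_mod_cast hn
  unfold convol_alt
  rw [if_neg (by omega : ¬ ((m:Int) ≤ 0))]
  rw [show ((m:Int)).toNat = m from by omega, show ((2 * (m:Int) - 1)).toNat = 2 * m - 1 from by omega]
  have hlin := pv_B_lin f g m hm
  have hres : convolAltRes (m:Int)
      ((PySem.List.pyRange 0 (m:Int) 1).foldl
        (convolAltRow (PySem.List.slice (f ++ List.replicate m 0) none (some (m:Int)))
          (PySem.List.slice (g ++ List.replicate m 0) none (some (m:Int))) m)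
        (List.replicate (2 * m - 1) 0))
      = (List.range m).map (fun k => pvLin f g m k + if k < m - 1 then pvLin f g m (k + m) else 0) := by
    unfold convolAltRes
    rw [pv_map_pyRange_zero m]
    apply List.map_congr_left
    intro k hk
    rw [List.mem_range] at hk
    have ekm : (k:Int) + (m:Int) = ((k + m : Nat) : Int) := by push_cast [Nat.cast_add]; ring
    by_cases hsplit : k < m - 1
    · rw [if_pos (by omega), if_pos hsplit, ekm]
      simp only [PySem.List.pyGetD_natCast, hlin]
    · rw [if_neg (by omega), if_neg hsplit]
      simp only [PySem.List.pyGetD_natCast, hlin]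
  rw [hres]
  unfold convolAltMod pvPost
  by_cases hp : p = 0 <;> simp [hp]

-- the two pre-mod lists agree entrywise
lemma pv_lin_low (f g : List Int) (m k : Nat) (hk : k < m) : pvLin f g m k = pvS1 f g k := by
  unfold pvLin pvS1
  have h1 : ∀ i ∈ Finset.range m,
      (∑ j ∈ Finset.range m, if i + j = k then pvCoef f i * pvCoef g j else 0)
        = if i ≤ k then pvCoef f i * pvCoef g (k - i) else 0 := by
    intro i hi
    rw [pv_inner_pick m i k (fun j => pvCoef f i * pvCoef g j)]
    simp only [Finset.mem_range] at hi
    congr 1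
    simp; omega
  rw [Finset.sum_congr rfl h1]
  conv_lhs => rw [Finset.range_eq_Ico,
      ← Finset.sum_Ico_consecutive (fun i => if i ≤ k then pvCoef f i * pvCoef g (k - i) else 0)
        (by omega : 0 ≤ k + 1) (by omega : k + 1 ≤ m)]
  have h2 : ∀ i ∈ Finset.Ico (k+1) m, (if i ≤ k then pvCoef f i * pvCoef g (k - i) else 0) = 0 := by
    intro i hi; simp only [Finset.mem_Ico] at hi; rw [if_neg]; omega
  have h3 : ∀ i ∈ Finset.Ico 0 (k+1), (if i ≤ k then pvCoef f i * pvCoef g (k - i) else 0)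
      = pvCoef f i * pvCoef g (k - i) := by
    intro i hi; simp only [Finset.mem_Ico] at hi; rw [if_pos]; omega
  rw [Finset.sum_congr rfl h2, Finset.sum_congr rfl h3]
  simp [Nat.Ico_zero_eq_range]

lemma pv_lin_high (f g : List Int) (m k : Nat) (hk : k < m) : pvLin f g m (k + m) = pvS2 f g m k := by
  unfold pvLin pvS2
  have h1 : ∀ i ∈ Finset.range m,
      (∑ j ∈ Finset.range m, if i + j = k + m then pvCoef f i * pvCoef g j else 0)
        = if k < i then pvCoef f i * pvCoef g (k + m - i) else 0 := by
    intro i hi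
    rw [pv_inner_pick m i (k + m) (fun j => pvCoef f i * pvCoef g j)]
    simp only [Finset.mem_range] at hi
    have : (i ≤ k + m ∧ k + m < i + m) ↔ k < i := by omega
    rw [if_congr this rfl rfl]
  rw [Finset.sum_congr rfl h1]
  conv_lhs => rw [Finset.range_eq_Ico,
      ← Finset.sum_Ico_consecutive (fun i => if k < i then pvCoef f i * pvCoef g (k + m - i) else 0)
        (by omega : 0 ≤ k + 1) (by omega : k + 1 ≤ m)]
  have h2 : ∀ i ∈ Finset.Ico 0 (k+1), (if k < i then pvCoef f i * pvCoef g (k + m - i) else 0) = 0 := by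
    intro i hi; simp only [Finset.mem_Ico] at hi; rw [if_neg]; omega
  have h3 : ∀ i ∈ Finset.Ico (k+1) m, (if k < i then pvCoef f i * pvCoef g (k + m - i) else 0)
      = pvCoef f i * pvCoef g (k + m - i) := by
    intro i hi; simp only [Finset.mem_Ico] at hi; rw [if_pos]; omega
  rw [Finset.sum_congr rfl h2, Finset.sum_congr rfl h3]
  simp only [Finset.sum_const_zero, zero_add]
  rw [Finset.sum_Ico_eq_sum_range]
  apply Finset.sum_congr rfl
  intro j hj
  simp only [Finset.mem_range] at hj
  congr 2
  omega

lemma pv_pointwise (f g : List Int) (m k : Nat) (hk : k < m) :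
    pvS1 f g k + pvS2 f g m k
      = pvLin f g m k + if k < m - 1 then pvLin f g m (k + m) else 0 := by
  rw [pv_lin_low f g m k hk]
  by_cases h : k < m - 1
  · rw [if_pos h, pv_lin_high f g m k hk]
  · rw [if_neg h]
    have h0 : m - (k + 1) = 0 := by omega
    simp [pvS2, h0]

lemma pv_neg_case (f g : List Int) (n p : Int) (hn : n ≤ 0) : convol f g n p = [] := by
  unfold convol convolModPass
  simp [PySem.List.pyRange_one_eq_nil hn, PySem.List.pyRange_one_eq_nil (le_refl (0:Int)),
        Int.toNat_of_nonpos hn]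

-- ===== VERDICT (by name: the statement is the Claim_ definition above) =====
theorem convol_spec : Claim_equal_convol := by
  intro f g n p _
  unfold Spec_convol
  by_cases hn : n ≤ 0
  · rw [pv_neg_case f g n p hn]
    simp [convol_alt, hn]
  · have hn' : 0 < n := by omega
    rw [pv_A_char f g n p hn', pv_B_char f g n p hn']
    congr 1
    apply List.map_congr_left
    intro k hk
    exact pv_pointwise f g n.toNat k (by simpa using hk)
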